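-- pv_equiv track=rewrite | github.com/jjnorris31/metodosNumericos | positive_negative_sum.py | sum_neg
-- ===== SOURCE A (Python) =====
-- def sum_neg(lst):
-- 	positive = 0
-- 	negative = 0
--
-- 	if not lst:
-- 		return []
--
-- 	for i in range(0, len(lst)):
-- 		if lst[i] >= 0:
-- 			positive += 1
-- 		else:
-- 			negative += lst[i]
--
-- 	return [positive, negative]
-- ===== SOURCE B (Python) =====
-- def sum_neg(lst):
--     if not lst:
--         return []
--     s = sorted(lst)
--     k = 0
--     while k < len(s) and s[k] < 0:
--         k += 1
--     return [len(s) - k, sum(s[:k])]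
-- ===== Notes on version B (the rewrite author's own statement) =====
-- stated objective: alternative
-- what changed: A fuses a counter and a sum in one index loop; B sorts the list, locates the negative/non-negative boundary k, and derives the count as len-k and the negative sum as the sum of the sorted prefix s[:k].
import Mathlib
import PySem

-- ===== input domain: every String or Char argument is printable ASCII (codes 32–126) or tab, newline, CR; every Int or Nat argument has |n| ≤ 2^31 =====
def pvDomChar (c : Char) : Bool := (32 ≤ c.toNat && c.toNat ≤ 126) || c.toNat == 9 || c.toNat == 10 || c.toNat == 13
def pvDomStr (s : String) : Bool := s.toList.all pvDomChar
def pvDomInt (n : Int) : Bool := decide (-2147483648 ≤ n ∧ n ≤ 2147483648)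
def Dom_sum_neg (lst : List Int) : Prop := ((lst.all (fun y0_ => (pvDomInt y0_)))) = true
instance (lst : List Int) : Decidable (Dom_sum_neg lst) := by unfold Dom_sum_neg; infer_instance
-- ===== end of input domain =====

-- B replaces A's fused index loop by sort-then-split: sort the list, find the negative/non-negative
-- boundary k, return [len - k, sum of the sorted prefix s[:k]]; alternative algorithm, not faster.


-- ===== PORT A =====
-- Port of A: fused loop over range(0, len(lst)) with (positive, negative) state.
def sum_neg (lst : List Int) : List Int :=
  if lst = [] then []
  else
    let s := (PySem.List.pyRange 0 lst.length 1).foldl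
      (fun (st : Int × Int) i =>
        let v := PySem.List.pyGetD lst i 0
        if v ≥ 0 then (st.1 + 1, st.2) else (st.1, st.2 + v))
      (0, 0)
    [s.1, s.2]

-- ===== PORT B =====
-- Port of B's `while k < len(s) and s[k] < 0: k += 1`: walk the sorted list from the front
-- while the element is negative, counting steps.
def negBoundary : List Int → Nat
  | [] => 0
  | x :: t => if x < 0 then negBoundary t + 1 else 0

-- Port of B: sort, find boundary k, return [len - k, sum s[:k]].
-- (s[:k] with 0 ≤ k is `take k`: PySem.List.slice_to.)
def sum_neg_alt (lst : List Int) : List Int :=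
  if lst = [] then []
  else
    let s := PySem.List.sorted lst (fun x => x) false
    let k := negBoundary s
    [((s.length : Int) - (k : Int)), (s.take k).sum]

-- ===== PRECONDITION & SPEC =====
def Spec_sum_neg (lst : List Int) (out : List Int) : Prop := out = sum_neg_alt lst
instance (lst : List Int) (out : List Int) : Decidable (Spec_sum_neg lst out) := by unfold Spec_sum_neg; infer_instance

-- ===== CLAIM (what is proved, stated in full; the proofs are below) =====
def Claim_equal_sum_neg : Prop := ∀ (lst : List Int), Dom_sum_neg lst → Spec_sum_neg lst (sum_neg lst)

-- ===== LEMMAS AND PROOFS =====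

-- A's fused loop computes the count of non-negatives and the sum of negatives.
theorem fused_loop_eq (lst : List Int) (p n : Int) :
    lst.foldl (fun (st : Int × Int) v =>
        if v ≥ 0 then (st.1 + 1, st.2) else (st.1, st.2 + v)) (p, n)
      = (p + ((lst.filter (fun x => x ≥ 0)).length : Int),
         n + (lst.filter (fun x => x < 0)).sum) := by
  induction lst generalizing p n with
  | nil => simp
  | cons x t ih =>
    by_cases hx : x ≥ 0
    · simp [List.foldl_cons, hx, ih, not_lt.mpr hx]
      ring
    · simp [List.foldl_cons, hx, ih, lt_of_not_ge hx]
      ring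

-- B's boundary walk is the length of the negative prefix.
theorem negBoundary_eq_takeWhile (s : List Int) :
    negBoundary s = (s.takeWhile (fun x => decide (x < 0))).length := by
  induction s with
  | nil => rfl
  | cons x t ih =>
    by_cases hx : x < 0 <;> simp [negBoundary, hx, ih]

-- On a sorted list, the negative prefix is exactly the negatives.
theorem takeWhile_neg_eq_filter (s : List Int) (hs : s.Pairwise (· ≤ ·)) :
    s.takeWhile (fun x => decide (x < 0)) = s.filter (fun x => decide (x < 0)) := by
  induction s with
  | nil => rfl
  | cons x t ih =>
    rcases List.pairwise_cons.mp hs with ⟨hx, ht⟩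
    by_cases h : x < 0
    · simp [h, ih ht]
    · simp only [List.takeWhile_cons, List.filter_cons, h, decide_false]
      simp only [Bool.false_eq_true, if_false]
      symm
      simp only [List.filter_eq_nil_iff]
      intro y hy
      simp only [decide_eq_true_eq, not_lt]
      exact le_trans (not_lt.mp h) (hx y hy)

-- ===== VERDICT (by name: the statement is the Claim_ definition above) =====
theorem sum_neg_spec : Claim_equal_sum_neg := by
  intro lst _
  unfold Spec_sum_neg sum_neg sum_neg_alt
  by_cases h : lst = []
  · simp [h]
  · simp only [if_neg h]
    rw [show (lst.length : Int) = PySem.List.len lst from rfl,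
        PySem.List.foldl_pyRange_zero_pyGetD lst 0
          (fun (st : Int × Int) v =>
            if v ≥ 0 then (st.1 + 1, st.2) else (st.1, st.2 + v)) (0,0),
        fused_loop_eq]
    set s := PySem.List.sorted lst (fun x => x) false with hsdef
    have hperm : s.Perm lst := PySem.List.sorted_perm lst (fun x => x) false
    have hpw : s.Pairwise (· ≤ ·) := by
      simpa using PySem.List.sorted_pairwise lst (fun x => x)
    have htw := takeWhile_neg_eq_filter s hpw
    have hk : negBoundary s = (s.filter (fun x => decide (x < 0))).length := by
      rw [negBoundary_eq_takeWhile, htw]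
    have htake : s.take (negBoundary s) = s.filter (fun x => decide (x < 0)) := by
      rw [negBoundary_eq_takeWhile,
          ← List.prefix_iff_eq_take.mp (List.takeWhile_prefix _), htw]
    have hfperm : (s.filter (fun x => decide (x < 0))).Perm
        (lst.filter (fun x => decide (x < 0))) := hperm.filter _
    have hsum : (s.take (negBoundary s)).sum = (lst.filter (fun x => x < 0)).sum := by
      rw [htake]; exact hfperm.sum_eq
    have hsplit : ∀ t : List Int, (t.filter (fun x => decide (x < 0))).length
        + (t.filter (fun x => decide (x ≥ 0))).length = t.length := by
      intro t
      induction t with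
      | nil => rfl
      | cons x r ih =>
        by_cases hx : x < 0
        · have hx2 : ¬ (x ≥ 0) := not_le.mpr hx
          simp only [List.filter_cons, hx, hx2, decide_true, decide_false, if_true,
            Bool.false_eq_true, if_false, List.length_cons]
          omega
        · have hx2 : x ≥ 0 := not_lt.mp hx
          simp only [List.filter_cons, hx, hx2, decide_true, decide_false, if_true,
            Bool.false_eq_true, if_false, List.length_cons]
          omega
    have hcnt : ((lst.filter (fun x => x ≥ 0)).length : Int)
        = (s.length : Int) - (negBoundary s : Int) := by
      have h1 : (lst.filter (fun x => decide (x ≥ 0))).length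
          = (s.filter (fun x => decide (x ≥ 0))).length :=
        ((hperm.filter _).length_eq).symm
      have h2 := hsplit s
      rw [hk]
      omega
    simp only [hcnt, hsum, zero_add]
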